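-- pv_equiv track=rewrite | github.com/davidiach/erdos97 | data/runs/2026-05-05/n10_secondary.py | triple_intersection_ok_incremental
-- ===== SOURCE A (Python) =====
-- from itertools import combinations
--
-- TRIPLE_CAP = 1  # |S_i intersect S_j intersect S_k| <= 1
--
-- def triple_intersection_ok_incremental(
--     assign: dict[int, int],
--     new_center: int,
--     new_mask: int,
-- ) -> bool:
--     """Faster check: only consider triples involving the new row."""
--     others = [(c, m) for c, m in assign.items() if c != new_center]
--     if len(others) < 2:
--         return True
--     for (a, ma), (b, mb) in combinations(others, 2):
--         inter = new_mask & ma & mb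
--         if bin(inter).count("1") > TRIPLE_CAP:
--             return False
--     return True
-- ===== SOURCE B (Python) =====
-- def triple_intersection_ok_incremental(
--     assign: dict[int, int],
--     new_center: int,
--     new_mask: int,
-- ) -> bool:
--     """Pair-coverage check: restrict every other row's mask to the bits of
--     new_mask; the triple cap is violated exactly when some pair of bit
--     positions is covered by two different rows, so track covered bit-pairs
--     in a set and flag the second coverage."""
--     seen = set()
--     nbits = new_mask.bit_length()
--     for c, m in assign.items():
--         if c == new_center:
--             continue
--         r = m & new_mask
--         bits = [i for i in range(nbits) if (r >> i) & 1]
--         for x in range(len(bits)):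
--             for y in range(x + 1, len(bits)):
--                 p = (bits[x], bits[y])
--                 if p in seen:
--                     return False
--                 seen.add(p)
--     return True
-- ===== Notes on version B (the rewrite author's own statement) =====
-- stated objective: faster
-- what changed: Replaces A's scan over all pairs of other rows (a popcount of a triple AND per pair) by a single pass over the rows that records each covered pair of new_mask bit positions in a set and returns False on the second coverage of a pair.
-- outside the precondition, e.g. on triple_intersection_ok_incremental({0: 3, 1: 3}, 5, -1): A returns False, B returns True
import Mathlib
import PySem

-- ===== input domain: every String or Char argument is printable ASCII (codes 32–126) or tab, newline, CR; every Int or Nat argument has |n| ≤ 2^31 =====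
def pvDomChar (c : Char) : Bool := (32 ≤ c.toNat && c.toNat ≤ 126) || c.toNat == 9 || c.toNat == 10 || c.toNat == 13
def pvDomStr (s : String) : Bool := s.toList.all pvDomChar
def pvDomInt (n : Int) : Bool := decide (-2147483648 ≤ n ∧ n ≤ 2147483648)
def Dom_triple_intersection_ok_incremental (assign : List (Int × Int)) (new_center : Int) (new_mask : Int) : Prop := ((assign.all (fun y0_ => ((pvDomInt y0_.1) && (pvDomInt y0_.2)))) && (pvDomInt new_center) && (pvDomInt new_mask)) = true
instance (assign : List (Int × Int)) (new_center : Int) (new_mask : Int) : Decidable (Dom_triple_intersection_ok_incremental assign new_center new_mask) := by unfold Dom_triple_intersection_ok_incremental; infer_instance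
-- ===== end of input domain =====

-- B replaces A's scan over all pairs of rows (O(k^2) popcounts) by a single pass that
-- records each covered pair of bit positions of new_mask in a set and fails on the
-- second coverage of a pair.  Equality of return values is proved for 0 ≤ new_mask.

-- ===== PORT A =====
-- bin(inter).count("1") counts the '1' characters of Python's bin string, i.e. the
-- bit count of |inter|: exactly PySem.Int.bitCount inter.
def triple_intersection_ok_incremental (assign : List (Int × Int)) (new_center : Int) (new_mask : Int) : Bool :=
  let others := assign.filter (fun p => p.1 != new_center)
  if others.length < 2 then true
  else
    (PySem.List.combinations others 2).all (fun pr =>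
      match pr with
      | [pa, pb] =>
          let inter := PySem.Int.band (PySem.Int.band new_mask pa.2) pb.2
          !(decide (1 < PySem.Int.bitCount inter))
      | _ => true)

-- ===== PORT B =====
-- bits = [i for i in range(nbits) if (r >> i) & 1]
def pvBits (nbits : Nat) (r : Int) : List Int :=
  (PySem.List.pyRange 0 (nbits : Int) 1).filter (fun i => PySem.Int.band (r >>> i.toNat) 1 == 1)

-- the double index loop 'for x … for y in range(x+1, …)' over the bits list
def pvPairs2 : List Int → List (Int × Int)
  | [] => []
  | x :: xs => xs.map (fun y => (x, y)) ++ pvPairs2 xs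

-- inner loop body: test-and-insert each pair into seen; none = 'return False' was hit
def pvAddPairs (seen : PySem.Set (Int × Int)) : List (Int × Int) → Option (PySem.Set (Int × Int))
  | [] => some seen
  | p :: ps => if PySem.Set.contains seen p then none else pvAddPairs (PySem.Set.add seen p) ps

def pvGoB (nc nm : Int) (nbits : Nat) : List (Int × Int) → PySem.Set (Int × Int) → Bool
  | [], _ => true
  | (c, m) :: rest, seen =>
    if c == nc then pvGoB nc nm nbits rest seen
    else
      match pvAddPairs seen (pvPairs2 (pvBits nbits (PySem.Int.band m nm))) with
      | none => false
      | some s => pvGoB nc nm nbits rest s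

def triple_intersection_ok_incremental_alt (assign : List (Int × Int)) (new_center : Int) (new_mask : Int) : Bool :=
  pvGoB new_center new_mask (PySem.Int.bitLength new_mask) assign PySem.Set.empty

-- ===== PRECONDITION & SPEC =====
-- Pre_ excludes negative new_mask: a mask is a nonnegative bitset of columns by design,
-- and on a negative new_mask A's 'bin(inter).count("1")' counts the bits of the ABSOLUTE
-- VALUE of a two's-complement intersection — an artefact of Python's bin() formatting
-- that no re-implementation would be specified to match.
def Pre_triple_intersection_ok_incremental (assign : List (Int × Int)) (new_center : Int) (new_mask : Int) : Prop :=
  0 ≤ new_mask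

instance (assign : List (Int × Int)) (new_center : Int) (new_mask : Int) : Decidable (Pre_triple_intersection_ok_incremental assign new_center new_mask) := by
  unfold Pre_triple_intersection_ok_incremental; infer_instance

def pvWitness_triple_intersection_ok_incremental : (List (Int × Int)) × Int × Int := ([(0, 3), (1, 5)], 2, 7)

def Spec_triple_intersection_ok_incremental (assign : List (Int × Int)) (new_center : Int) (new_mask : Int) (out : Bool) : Prop := out = triple_intersection_ok_incremental_alt assign new_center new_mask
instance (assign : List (Int × Int)) (new_center : Int) (new_mask : Int) (out : Bool) : Decidable (Spec_triple_intersection_ok_incremental assign new_center new_mask out) := by unfold Spec_triple_intersection_ok_incremental; infer_instance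

-- ===== CLAIM (what is proved, stated in full; the proofs are below) =====
def Claim_equal_triple_intersection_ok_incremental : Prop := ∀ (assign : List (Int × Int)) (new_center : Int) (new_mask : Int), Dom_triple_intersection_ok_incremental assign new_center new_mask → Pre_triple_intersection_ok_incremental assign new_center new_mask → Spec_triple_intersection_ok_incremental assign new_center new_mask (triple_intersection_ok_incremental assign new_center new_mask)

-- ===== LEMMAS AND PROOFS =====

-- the row-pair list B builds for one row of mask m (nbits will be bitLength new_mask)
def pvRP (nbits : Nat) (nm m : Int) : List (Int × Int) :=
  pvPairs2 (pvBits nbits (PySem.Int.band m nm))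

-- ---------- Nat bit arithmetic ----------

lemma pv_and_add_ldiff (a c : Nat) : (a &&& c) + a.ldiff c = a := by
  induction a using Nat.strong_induction_on generalizing c with
  | _ a ih =>
    rcases Nat.eq_zero_or_pos a with h0 | hpos
    · subst h0
      have h1 : (0 &&& c) = 0 := Nat.zero_and c
      have h2 : Nat.ldiff 0 c = 0 := by
        apply Nat.eq_of_testBit_eq
        intro k
        simp [Nat.testBit_ldiff, Nat.zero_testBit]
      omega
    · have hx2 : (a &&& c) / 2 = (a / 2) &&& (c / 2) := Nat.and_div_two
      have hd2 : (a.ldiff c) / 2 = (a / 2).ldiff (c / 2) := by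
        apply Nat.eq_of_testBit_eq
        intro k
        simp only [← Nat.testBit_add_one, Nat.testBit_ldiff]
      have hih := ih (a / 2) (by omega) (c / 2)
      have hx1 : (a &&& c) % 2 = 1 ↔ (a % 2 = 1 ∧ c % 2 = 1) := by
        have h := Nat.testBit_land a c 0
        rw [Nat.testBit_zero, Nat.testBit_zero, Nat.testBit_zero, ← Bool.decide_and] at h
        exact decide_eq_decide.mp h
      have hd1 : (a.ldiff c) % 2 = 1 ↔ (a % 2 = 1 ∧ ¬(c % 2 = 1)) := by
        have h := Nat.testBit_ldiff a c 0
        rw [Nat.testBit_zero, Nat.testBit_zero, Nat.testBit_zero, ← decide_not, ← Bool.decide_and] at h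
        exact decide_eq_decide.mp h
      by_cases hA : a % 2 = 1 <;> by_cases hC : c % 2 = 1
      · have h1 := hx1.mpr ⟨hA, hC⟩
        have h2 : ¬(a.ldiff c % 2 = 1) := fun hh => (hd1.mp hh).2 hC
        omega
      · have h1 : ¬((a &&& c) % 2 = 1) := fun hh => hC (hx1.mp hh).2
        have h2 := hd1.mpr ⟨hA, hC⟩
        omega
      · have h1 : ¬((a &&& c) % 2 = 1) := fun hh => hA (hx1.mp hh).1
        have h2 : ¬(a.ldiff c % 2 = 1) := fun hh => hA (hd1.mp hh).1
        omega
      · have h1 : ¬((a &&& c) % 2 = 1) := fun hh => hA (hx1.mp hh).1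
        have h2 : ¬(a.ldiff c % 2 = 1) := fun hh => hA (hd1.mp hh).1
        omega

lemma pv_sub_and_eq_ldiff (a c : Nat) : a - (a &&& c) = a.ldiff c := by
  have := pv_and_add_ldiff a c
  omega

-- bit k of PySem.Int.band is the conjunction of the bits (all four sign cases)
lemma pv_testBit_band (a b : Int) (k : Nat) :
    (PySem.Int.band a b).testBit k = (a.testBit k && b.testBit k) := by
  have hofNat : ∀ (u : Nat) (i : Nat), Int.testBit (u : Int) i = u.testBit i := fun _ _ => rfl
  have hnegRep : ∀ (x : Int), x < 0 → x = Int.negSucc ((-x - 1).toNat) := by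
    intro x hx
    rw [Int.negSucc_eq]
    omega
  unfold PySem.Int.band
  have hnn : ∀ (x : Int) (i : Nat), 0 ≤ x → x.testBit i = x.toNat.testBit i := by
    intro x i hx
    conv_lhs => rw [← Int.toNat_of_nonneg hx]
    exact hofNat x.toNat i
  by_cases ha : 0 ≤ a <;> by_cases hb : 0 ≤ b <;> simp only [ha, hb, if_pos, if_neg, not_false_iff]
  · -- both nonneg
    rw [hofNat, Nat.testBit_land, hnn a k ha, hnn b k hb]
  · -- 0 ≤ a, b < 0
    have hbrep := hnegRep b (by omega)
    rw [hofNat, pv_sub_and_eq_ldiff, Nat.testBit_ldiff, hnn a k ha]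
    conv_rhs => rw [hbrep]
    rfl
  · -- a < 0, 0 ≤ b
    have harep := hnegRep a (by omega)
    rw [hofNat, pv_sub_and_eq_ldiff, Nat.testBit_ldiff, hnn b k hb]
    conv_rhs => rw [harep]
    rw [Bool.and_comm]
    rfl
  · -- both negative
    have harep := hnegRep a (by omega)
    have hbrep := hnegRep b (by omega)
    have hres : -(((-a - 1).toNat ||| (-b - 1).toNat : Nat) : Int) - 1
        = Int.negSucc ((-a - 1).toNat ||| (-b - 1).toNat) := by
      rw [Int.negSucc_eq]; ring
    rw [hres]
    conv_rhs => rw [harep, hbrep]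
    simp [Int.testBit, Nat.testBit_or]

lemma pv_band_nonneg_right (nm m : Int) (h : 0 ≤ nm) : 0 ≤ PySem.Int.band m nm := by
  rw [PySem.Int.band_comm]
  exact PySem.Int.band_nonneg_of_nonneg_left m h

-- a set bit of a nonneg x bounded by nm lies below bitLength nm
lemma pv_tb_lt_bitLength (nm : Int) (h : 0 ≤ nm) (k : Nat) (hk : Int.testBit nm k = true) :
    k < PySem.Int.bitLength nm := by
  have h1 : nm.toNat.testBit k = true := by
    rw [← Int.toNat_of_nonneg h] at hk
    exact hk
  have h2 := Nat.ge_two_pow_of_testBit h1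
  have h3 := PySem.Int.lt_two_pow_bitLength nm
  by_contra hle
  have hle' : PySem.Int.bitLength nm ≤ k := Nat.le_of_not_lt hle
  have h4 : (2 : Nat) ^ PySem.Int.bitLength nm ≤ 2 ^ k := Nat.pow_le_pow_right (by norm_num) hle'
  have h5 : nm.natAbs = nm.toNat := by omega
  omega

-- ---------- bitCount ----------

lemma pv_bc_pos (u : Nat) : 0 < PySem.Int.bitCount (u : Int) ↔ u ≠ 0 := by
  induction u using Nat.strong_induction_on with
  | _ u ih =>
    rcases Nat.eq_zero_or_pos u with h0 | hpos
    · subst h0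
      simp [PySem.Int.bitCount_zero]
    · rw [PySem.Int.bitCount_natCast hpos]
      constructor
      · intro _; omega
      · intro _
        rcases Nat.mod_two_eq_zero_or_one u with h2 | h2
        · have hu2 : u / 2 ≠ 0 := by omega
          have := (ih (u / 2) (by omega)).mpr hu2
          omega
        · omega

lemma pv_bc_two (u : Nat) :
    1 < PySem.Int.bitCount (u : Int) ↔
      ∃ i j : Nat, i < j ∧ u.testBit i = true ∧ u.testBit j = true := by
  induction u using Nat.strong_induction_on with
  | _ u ih =>
    rcases Nat.eq_zero_or_pos u with h0 | hpos
    · subst h0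
      simp [PySem.Int.bitCount_zero, Nat.zero_testBit]
    · rw [PySem.Int.bitCount_natCast hpos]
      have hsplit : ∀ k, u.testBit (k + 1) = (u / 2).testBit k := fun k => Nat.testBit_add_one u k
      rcases Nat.mod_two_eq_zero_or_one u with h2 | h2
      · have hb0 : u.testBit 0 = false := by simp [Nat.testBit_zero, h2]
        rw [h2, Nat.zero_add, ih (u / 2) (by omega)]
        constructor
        · rintro ⟨i, j, hij, hi, hj⟩
          exact ⟨i + 1, j + 1, by omega, by rw [hsplit]; exact hi, by rw [hsplit]; exact hj⟩
        · rintro ⟨i, j, hij, hi, hj⟩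
          cases i with
          | zero => rw [hb0] at hi; cases hi
          | succ i' =>
            cases j with
            | zero => omega
            | succ j' =>
              exact ⟨i', j', by omega, by rw [← hsplit]; exact hi, by rw [← hsplit]; exact hj⟩
      · have hb0 : u.testBit 0 = true := by simp [Nat.testBit_zero, h2]
        rw [h2]
        constructor
        · intro h
          have hne : u / 2 ≠ 0 := (pv_bc_pos (u / 2)).mp (by omega)
          obtain ⟨k, hk⟩ := Nat.exists_testBit_of_ne_zero hne
          exact ⟨0, k + 1, by omega, hb0, by rw [hsplit]; exact hk⟩
        · rintro ⟨i, j, hij, hi, hj⟩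
          have hj' : (u / 2).testBit (j - 1) = true := by
            cases j with
            | zero => omega
            | succ j' => rw [← hsplit]; simpa using hj
          have hne : u / 2 ≠ 0 := by
            intro h
            rw [h] at hj'
            simp [Nat.zero_testBit] at hj'
          have := (pv_bc_pos (u / 2)).mpr hne
          omega

-- ---------- pvBits / pvPairs2 ----------

lemma pv_mem_bits (nbits : Nat) (r : Int) (hr : 0 ≤ r) (x : Int) :
    x ∈ pvBits nbits r ↔ (0 ≤ x ∧ x < (nbits : Int) ∧ r.testBit x.toNat = true) := by
  unfold pvBits
  rw [List.mem_filter, PySem.List.mem_pyRange_one]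
  have hcond : (PySem.Int.band (r >>> x.toNat) 1 == 1) = true ↔ r.testBit x.toNat = true := by
    rw [← Int.toNat_of_nonneg hr]
    have hshift : ((r.toNat : Int) >>> x.toNat) = ((r.toNat >>> x.toNat : Nat) : Int) := rfl
    rw [hshift]
    have hone : (1 : Int) = ((1 : Nat) : Int) := rfl
    rw [hone, PySem.Int.band_natCast]
    constructor
    · intro h
      have h1 : ((r.toNat >>> x.toNat &&& 1 : Nat) : Int) = ((1 : Nat) : Int) := by
        exact beq_iff_eq.mp h
      have h2 : r.toNat >>> x.toNat &&& 1 = 1 := by exact_mod_cast h1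
      have : Int.testBit ((r.toNat : Int)) x.toNat = r.toNat.testBit x.toNat := rfl
      rw [this, Nat.testBit_eq_decide_div_mod_eq]
      rw [Nat.and_one_is_mod, Nat.shiftRight_eq_div_pow] at h2
      simp [h2]
    · intro h
      have h1 : r.toNat.testBit x.toNat = true := h
      rw [Nat.testBit_eq_decide_div_mod_eq] at h1
      have h2 : r.toNat / 2 ^ x.toNat % 2 = 1 := of_decide_eq_true h1
      have h3 : r.toNat >>> x.toNat &&& 1 = 1 := by
        rw [Nat.and_one_is_mod, Nat.shiftRight_eq_div_pow]
        exact h2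
      rw [h3]
      exact beq_iff_eq.mpr rfl
  rw [hcond]
  tauto

lemma pv_bits_sorted (nbits : Nat) (r : Int) : (pvBits nbits r).Pairwise (· < ·) := by
  unfold pvBits
  exact (PySem.List.pairwise_lt_pyRange_one _ _).filter _

lemma pv_mem_pairs2 (l : List Int) (h : l.Pairwise (· < ·)) (a b : Int) :
    (a, b) ∈ pvPairs2 l ↔ a ∈ l ∧ b ∈ l ∧ a < b := by
  induction l with
  | nil => simp [pvPairs2]
  | cons x xs ihl =>
    rw [List.pairwise_cons] at h
    obtain ⟨hx, hxs⟩ := h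
    have ih := ihl hxs
    simp only [pvPairs2, List.mem_append, List.mem_map, List.mem_cons]
    constructor
    · rintro (⟨y, hy, hey⟩ | hmem)
      · obtain ⟨h1, h2⟩ := Prod.mk.injEq .. |>.mp hey
        subst h1; subst h2
        exact ⟨Or.inl rfl, Or.inr hy, hx y hy⟩
      · obtain ⟨ha, hb, hab⟩ := ih.mp hmem
        exact ⟨Or.inr ha, Or.inr hb, hab⟩
    · rintro ⟨ha | ha, hb | hb, hab⟩
      · omega
      · exact Or.inl ⟨b, hb, by rw [ha]⟩
      · have := hx a ha; omega
      · exact Or.inr (ih.mpr ⟨ha, hb, hab⟩)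

lemma pv_pairs2_fst_mem (l : List Int) (p : Int × Int) (h : p ∈ pvPairs2 l) : p.1 ∈ l := by
  induction l with
  | nil => simp [pvPairs2] at h
  | cons x xs ih =>
    simp only [pvPairs2, List.mem_append, List.mem_map] at h
    rcases h with ⟨y, _, hey⟩ | h
    · rw [← hey]; exact List.mem_cons_self ..
    · exact List.mem_cons_of_mem _ (ih h)

lemma pv_pairs2_nodup (l : List Int) (h : l.Pairwise (· < ·)) : (pvPairs2 l).Nodup := by
  induction l with
  | nil => simp [pvPairs2]
  | cons x xs ihl =>
    rw [List.pairwise_cons] at h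
    obtain ⟨hx, hxs⟩ := h
    simp only [pvPairs2]
    apply List.Nodup.append
    · have hxsnd : xs.Nodup := List.Pairwise.imp (fun hab => ne_of_lt hab) hxs
      refine List.Nodup.map ?_ hxsnd
      intro a b hab
      exact congrArg Prod.snd hab
    · exact ihl hxs
    · intro p hp1 hp2
      obtain ⟨y, hy, hey⟩ := List.mem_map.mp hp1
      have hfst : p.1 = x := by rw [← hey]
      have := pv_pairs2_fst_mem xs p hp2
      rw [hfst] at this
      have := hx x this
      omega

-- ---------- pvAddPairs ----------

lemma pv_addPairs_none_iff (ps : List (Int × Int)) (seen : PySem.Set (Int × Int))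
    (hn : ps.Nodup) : pvAddPairs seen ps = none ↔ ∃ p ∈ ps, p ∈ seen := by
  induction ps generalizing seen with
  | nil => simp [pvAddPairs]
  | cons p ps ih =>
    rw [List.nodup_cons] at hn
    obtain ⟨hp, hps⟩ := hn
    simp only [pvAddPairs]
    by_cases hc : p ∈ seen
    · rw [if_pos ((PySem.Set.contains_iff seen p).mpr hc)]
      simp only [List.mem_cons]
      exact ⟨fun _ => ⟨p, Or.inl rfl, hc⟩, fun _ => trivial⟩
    · rw [if_neg (by
        intro h
        exact hc ((PySem.Set.contains_iff seen p).mp h))]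
      rw [ih (PySem.Set.add seen p) hps]
      constructor
      · rintro ⟨q, hq, hqs⟩
        rcases (PySem.Set.mem_add seen p q).mp hqs with h | h
        · exact ⟨q, List.mem_cons_of_mem _ hq, h⟩
        · exact absurd (h ▸ hq) hp
      · rintro ⟨q, hq, hqs⟩
        rcases List.mem_cons.mp hq with rfl | hq'
        · exact absurd hqs hc
        · exact ⟨q, hq', (PySem.Set.mem_add seen p q).mpr (Or.inl hqs)⟩

lemma pv_addPairs_some_mem (ps : List (Int × Int)) (seen s : PySem.Set (Int × Int))
    (h : pvAddPairs seen ps = some s) : ∀ x, x ∈ s ↔ x ∈ seen ∨ x ∈ ps := by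
  induction ps generalizing seen with
  | nil =>
    simp only [pvAddPairs, Option.some.injEq] at h
    subst h
    simp
  | cons p ps ih =>
    simp only [pvAddPairs] at h
    split at h
    · exact absurd h (by simp)
    · intro x
      rw [ih (PySem.Set.add seen p) h x, PySem.Set.mem_add]
      simp only [List.mem_cons]
      tauto

-- ---------- pvGoB invariant ----------

lemma pv_goB_iff (nc nm : Int) (nbits : Nat) (l : List (Int × Int)) (seen : PySem.Set (Int × Int)) :
    pvGoB nc nm nbits l seen = true ↔
      ((l.filter (fun q => q.1 != nc)).Pairwise
          (fun q1 q2 => ∀ p, p ∈ pvRP nbits nm q1.2 → p ∉ pvRP nbits nm q2.2)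
        ∧ ∀ q ∈ l.filter (fun q => q.1 != nc), ∀ p ∈ pvRP nbits nm q.2, p ∉ seen) := by
  induction l generalizing seen with
  | nil => simp [pvGoB]
  | cons q rest ih =>
    obtain ⟨c, m⟩ := q
    by_cases hc : c = nc
    · have hfilter : ((c, m) :: rest).filter (fun q => q.1 != nc) = rest.filter (fun q => q.1 != nc) := by
        simp [hc]
      rw [hfilter]
      show pvGoB nc nm nbits ((c, m) :: rest) seen = true ↔ _
      simp only [pvGoB, hc, beq_self_eq_true, if_true]
      exact ih seen
    · have hfilter : ((c, m) :: rest).filter (fun q => q.1 != nc) = (c, m) :: rest.filter (fun q => q.1 != nc) := by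
        simp [hc]
      rw [hfilter]
      have hnodup : (pvPairs2 (pvBits nbits (PySem.Int.band m nm))).Nodup :=
        pv_pairs2_nodup _ (pv_bits_sorted nbits _)
      show pvGoB nc nm nbits ((c, m) :: rest) seen = true ↔ _
      simp only [pvGoB, beq_iff_eq, if_neg hc]
      rcases hsome : pvAddPairs seen (pvPairs2 (pvBits nbits (PySem.Int.band m nm))) with _ | s
      · have hex := (pv_addPairs_none_iff _ seen hnodup).mp hsome
        simp only [List.pairwise_cons, List.mem_cons]
        constructor
        · intro h; cases h
        · rintro ⟨_, hall⟩
          obtain ⟨p, hp, hps⟩ := hex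
          exact absurd hps (hall (c, m) (Or.inl rfl) p hp)
      · have hmem := pv_addPairs_some_mem _ seen s hsome
        have hnone : ∀ p ∈ pvRP nbits nm m, p ∉ seen := by
          intro p hp hps
          have : pvAddPairs seen (pvPairs2 (pvBits nbits (PySem.Int.band m nm))) = none :=
            (pv_addPairs_none_iff _ seen hnodup).mpr ⟨p, hp, hps⟩
          rw [hsome] at this
          cases this
        rw [ih s]
        simp only [List.pairwise_cons, List.mem_cons]
        constructor
        · rintro ⟨hpw, hseen⟩
          refine ⟨⟨?_, hpw⟩, ?_⟩
          · intro q hq p hp hpz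
            exact (hseen q hq p hpz) ((hmem p).mpr (Or.inr hp))
          · rintro q (rfl | hq) p hp
            · exact hnone p hp
            · intro hps
              exact (hseen q hq p hp) ((hmem p).mpr (Or.inl hps))
        · rintro ⟨⟨hhead, hpw⟩, hall⟩
          refine ⟨hpw, ?_⟩
          intro q hq p hp hps
          rcases (hmem p).mp hps with h | h
          · exact hall q (Or.inr hq) p hp h
          · exact hhead q hq p h hp

-- ---------- row pairs vs shared popcount ----------

lemma pv_mem_RP (nbits : Nat) (nm m : Int) (h : 0 ≤ nm) (hb : PySem.Int.bitLength nm ≤ nbits)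
    (a b : Int) :
    (a, b) ∈ pvRP nbits nm m ↔
      ∃ i j : Nat, a = (i : Int) ∧ b = (j : Int) ∧ i < j ∧
        (nm.testBit i && m.testBit i) = true ∧ (nm.testBit j && m.testBit j) = true := by
  unfold pvRP
  have hr : 0 ≤ PySem.Int.band m nm := pv_band_nonneg_right nm m h
  rw [pv_mem_pairs2 _ (pv_bits_sorted nbits _) a b]
  rw [pv_mem_bits nbits _ hr a, pv_mem_bits nbits _ hr b]
  have hbit : ∀ (k : Nat), (PySem.Int.band m nm).testBit k = (m.testBit k && nm.testBit k) :=
    fun k => pv_testBit_band m nm k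
  constructor
  · rintro ⟨⟨ha0, _, hab⟩, ⟨hb0, _, hbb⟩, hlt⟩
    refine ⟨a.toNat, b.toNat, (Int.toNat_of_nonneg ha0).symm, (Int.toNat_of_nonneg hb0).symm, by omega, ?_, ?_⟩
    · rw [hbit a.toNat] at hab
      rw [Bool.and_comm]
      exact hab
    · rw [hbit b.toNat] at hbb
      rw [Bool.and_comm]
      exact hbb
  · rintro ⟨i, j, rfl, rfl, hij, hi, hj⟩
    rw [Bool.and_eq_true] at hi hj
    have hibound : i < PySem.Int.bitLength nm := pv_tb_lt_bitLength nm h i hi.1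
    have hjbound : j < PySem.Int.bitLength nm := pv_tb_lt_bitLength nm h j hj.1
    have hti : (i : Int).toNat = i := Int.toNat_natCast i
    have htj : (j : Int).toNat = j := Int.toNat_natCast j
    refine ⟨⟨by positivity, by exact_mod_cast by omega, ?_⟩, ⟨by positivity, by exact_mod_cast by omega, ?_⟩, by exact_mod_cast hij⟩
    · rw [hti, hbit i, hi.2, hi.1]; rfl
    · rw [htj, hbit j, hj.2, hj.1]; rfl

lemma pv_shared_iff (nbits : Nat) (nm ma mb : Int) (h : 0 ≤ nm) (hb : PySem.Int.bitLength nm ≤ nbits) :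
    (1 < PySem.Int.bitCount (PySem.Int.band (PySem.Int.band nm ma) mb)) ↔
      ∃ p, p ∈ pvRP nbits nm ma ∧ p ∈ pvRP nbits nm mb := by
  set w := PySem.Int.band (PySem.Int.band nm ma) mb with hw
  have hw0 : 0 ≤ w := PySem.Int.band_nonneg_of_nonneg_left mb (PySem.Int.band_nonneg_of_nonneg_left ma h)
  have hwN : w = ((w.toNat : Nat) : Int) := (Int.toNat_of_nonneg hw0).symm
  have hbitw : ∀ k : Nat, w.toNat.testBit k = (nm.testBit k && ma.testBit k && mb.testBit k) := by
    intro k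
    have h1 : w.toNat.testBit k = w.testBit k := by
      conv_rhs => rw [hwN]
      rfl
    rw [h1, hw, pv_testBit_band, pv_testBit_band]
  rw [hwN, pv_bc_two]
  constructor
  · rintro ⟨i, j, hij, hi, hj⟩
    rw [hbitw] at hi hj
    simp only [Bool.and_eq_true] at hi hj
    refine ⟨((i : Int), (j : Int)), ?_, ?_⟩
    · exact (pv_mem_RP nbits nm ma h hb _ _).mpr ⟨i, j, rfl, rfl, hij, by simp [hi.1.1, hi.1.2], by simp [hj.1.1, hj.1.2]⟩
    · exact (pv_mem_RP nbits nm mb h hb _ _).mpr ⟨i, j, rfl, rfl, hij, by simp [hi.1.1, hi.2], by simp [hj.1.1, hj.2]⟩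
  · rintro ⟨⟨a, b⟩, hpa, hpb⟩
    obtain ⟨i, j, hai, hbj, hij, hia, hja⟩ := (pv_mem_RP nbits nm ma h hb _ _).mp hpa
    obtain ⟨i', j', hai', hbj', hij', hib, hjb⟩ := (pv_mem_RP nbits nm mb h hb _ _).mp hpb
    have hii : i' = i := by
      have hcast : (i : Int) = (i' : Int) := by rw [← hai, ← hai']
      exact_mod_cast hcast.symm
    have hjj : j' = j := by
      have hcast : (j : Int) = (j' : Int) := by rw [← hbj, ← hbj']
      exact_mod_cast hcast.symm
    subst hii; subst hjj
    rw [Bool.and_eq_true] at hia hja hib hjb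
    refine ⟨i', j', hij', ?_, ?_⟩
    · rw [hbitw]; simp [hia.1, hia.2, hib.2]
    · rw [hbitw]; simp [hja.1, hja.2, hjb.2]

-- ---------- A characterisation ----------

lemma pv_A_iff (assign : List (Int × Int)) (nc nm : Int) :
    triple_intersection_ok_incremental assign nc nm = true ↔
      ∀ a b : Int × Int, [a, b].Sublist (assign.filter (fun p => p.1 != nc)) →
        ¬ (1 < PySem.Int.bitCount (PySem.Int.band (PySem.Int.band nm a.2) b.2)) := by
  unfold triple_intersection_ok_incremental
  set others := assign.filter (fun p => p.1 != nc) with hothers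
  by_cases hlen : others.length < 2
  · rw [if_pos hlen]
    constructor
    · intro _ a b hsub
      have := hsub.length_le
      simp at this
      omega
    · intro _; rfl
  · rw [if_neg hlen, List.all_eq_true]
    constructor
    · intro h a b hsub
      have hc : [a, b] ∈ PySem.List.combinations others 2 :=
        (PySem.List.mem_combinations_iff others 2 [a, b]).mpr ⟨hsub, rfl⟩
      have := h _ hc
      simpa using this
    · intro h c hc
      obtain ⟨hsub, hlen2⟩ := (PySem.List.mem_combinations_iff others 2 c).mp hc
      match c, hlen2 with
      | [a, b], _ =>
        have := h a b hsub
        simpa using this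

-- ---------- B characterisation ----------

lemma pv_B_iff (assign : List (Int × Int)) (nc nm : Int) :
    triple_intersection_ok_incremental_alt assign nc nm = true ↔
      (assign.filter (fun p => p.1 != nc)).Pairwise
        (fun q1 q2 => ∀ p, p ∈ pvRP (PySem.Int.bitLength nm) nm q1.2 → p ∉ pvRP (PySem.Int.bitLength nm) nm q2.2) := by
  unfold triple_intersection_ok_incremental_alt
  rw [pv_goB_iff]
  simp [PySem.Set.empty]

-- ===== VERDICT (by name: the statement is the Claim_ definition above) =====
theorem triple_intersection_ok_incremental_spec : Claim_equal_triple_intersection_ok_incremental := by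
  intro assign nc nm hdom hpre
  unfold Spec_triple_intersection_ok_incremental
  have hnm : 0 ≤ nm := hpre
  rw [Bool.eq_iff_iff, pv_A_iff, pv_B_iff, List.pairwise_iff_forall_sublist]
  constructor
  · intro h a b hsub p hpa hpb
    exact h a b hsub ((pv_shared_iff (PySem.Int.bitLength nm) nm a.2 b.2 hnm le_rfl).mpr ⟨p, hpa, hpb⟩)
  · intro h a b hsub hshared
    obtain ⟨p, hpa, hpb⟩ := (pv_shared_iff (PySem.Int.bitLength nm) nm a.2 b.2 hnm le_rfl).mp hshared
    exact h hsub p hpa hpb
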